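-- pv_equiv track=rewrite | github.com/mapardo-lab/connecta4 | connecta/list_utils.py | find_strike
-- ===== SOURCE A (Python) =====
-- def find_strike(list_elements, needle, n):
--     """
--     Devuelve True si encuentra el n o más número de veces
--     needle seguidos en list_elements
--     """
--     if n <= 0:
--         return False
--     count = 0
--     i = 0
--     while count < n and i < len(list_elements):
--         if needle == list_elements[i]:
--             count += 1
--         else:
--             count = 0
--         i += 1
--     return count >= n
-- ===== SOURCE B (Python) =====
-- def find_strike(list_elements, needle, n):
--     if n <= 0 or n > len(list_elements):
--         return False
--     flags = bytes(x == needle for x in list_elements)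
--     return flags.find(b'\x01' * n) != -1
-- ===== Notes on version B (the rewrite author's own statement) =====
-- stated objective: faster
-- what changed: Replaced the running counter/reset while-loop with a bitmap plus substring search: map the list to a bytes of equality flags once and test with bytes.find whether a block of n set flags occurs.
import Mathlib
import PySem

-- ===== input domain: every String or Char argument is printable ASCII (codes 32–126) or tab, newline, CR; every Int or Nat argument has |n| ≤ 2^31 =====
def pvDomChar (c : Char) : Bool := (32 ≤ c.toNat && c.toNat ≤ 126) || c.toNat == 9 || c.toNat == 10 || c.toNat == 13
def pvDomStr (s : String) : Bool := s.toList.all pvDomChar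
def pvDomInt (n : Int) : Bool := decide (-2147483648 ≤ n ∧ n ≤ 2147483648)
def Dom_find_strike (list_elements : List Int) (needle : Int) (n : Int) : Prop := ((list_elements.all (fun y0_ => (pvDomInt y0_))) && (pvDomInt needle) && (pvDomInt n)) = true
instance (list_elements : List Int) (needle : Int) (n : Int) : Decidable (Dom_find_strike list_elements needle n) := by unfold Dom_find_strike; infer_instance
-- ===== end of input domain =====

-- B replaces A's running counter/reset loop with a bitmap + substring search: map the list
-- to equality flags and look for the block of n set flags with bytes.find (measured faster).

-- ===== PORT A =====
-- the while loop: exits when count ≥ n or the list is exhausted, then returns count ≥ n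
def pvLoopA (needle n : Int) : List Int → Int → Bool
  | [], count => decide (n ≤ count)
  | x :: rest, count =>
    if count < n then
      pvLoopA needle n rest (if needle = x then count + 1 else 0)
    else decide (n ≤ count)

def find_strike (list_elements : List Int) (needle : Int) (n : Int) : Bool :=
  if n ≤ 0 then false
  else pvLoopA needle n list_elements 0

-- ===== PORT B =====
-- bytes.find ported by hand, exact for find(pattern): first index i with s[i:i+len(p)] == p, else -1
-- (the [] fallback is unreachable here: the pattern is nonempty on every call)
def pvFindAux (p : List Bool) : List Bool → Int → Int
  | s, i =>
    if s.length < p.length then -1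
    else if s.take p.length == p then i
    else match s with
      | [] => -1
      | _ :: rest => pvFindAux p rest (i + 1)

-- flags = bytes(x == needle for x in list_elements); bytes model: List Bool (each byte 0/1)
def find_strike_alt (list_elements : List Int) (needle : Int) (n : Int) : Bool :=
  if n ≤ 0 ∨ (list_elements.length : Int) < n then false
  else
    let flags := list_elements.map (fun x => x == needle)
    decide (pvFindAux (List.replicate n.toNat true) flags 0 ≠ -1)

-- ===== PRECONDITION & SPEC =====
def Spec_find_strike (list_elements : List Int) (needle : Int) (n : Int) (out : Bool) : Prop := out = find_strike_alt list_elements needle n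
instance (list_elements : List Int) (needle : Int) (n : Int) (out : Bool) : Decidable (Spec_find_strike list_elements needle n out) := by unfold Spec_find_strike; infer_instance

-- ===== CLAIM (what is proved, stated in full; the proofs are below) =====
def Claim_equal_find_strike : Prop := ∀ (list_elements : List Int) (needle : Int) (n : Int), Dom_find_strike list_elements needle n → Spec_find_strike list_elements needle n (find_strike list_elements needle n)

-- ===== LEMMAS AND PROOFS =====

-- A's loop without the early exit: accumulate, OR the success test at each step
def pvG (needle n : Int) : List Int → Int → Bool
  | [], _ => false
  | x :: rest, count =>
    let c' := if needle = x then count + 1 else 0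
    decide (n ≤ c') || pvG needle n rest c'

-- length of the leading run of needle
def pvPref (needle : Int) : List Int → Nat
  | [] => 0
  | x :: rest => if needle = x then pvPref needle rest + 1 else 0

-- "some suffix starts with a needle-run of length ≥ n"
def pvHas (needle n : Int) : List Int → Bool
  | [] => false
  | x :: rest => decide (n ≤ (pvPref needle (x :: rest) : Int)) || pvHas needle n rest

theorem pvPref_le_length (needle : Int) (xs : List Int) : pvPref needle xs ≤ xs.length := by
  induction xs with
  | nil => simp [pvPref]
  | cons x rest ih =>
    simp only [pvPref, List.length_cons]
    split <;> omega

theorem pvLoopA_eq_pvG (needle n : Int) (xs : List Int) (c : Int) :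
    pvLoopA needle n xs c = (decide (n ≤ c) || pvG needle n xs c) := by
  induction xs generalizing c with
  | nil => simp [pvLoopA, pvG]
  | cons x rest ih =>
    show (if c < n then pvLoopA needle n rest (if needle = x then c + 1 else 0)
          else decide (n ≤ c))
        = (decide (n ≤ c) ||
            (decide (n ≤ (if needle = x then c + 1 else 0)) ||
              pvG needle n rest (if needle = x then c + 1 else 0)))
    by_cases h : c < n
    · rw [if_pos h, ih]
      have hnc : decide (n ≤ c) = false := by simp; omega
      rw [hnc, Bool.false_or]
    · rw [if_neg h]
      have hnc : decide (n ≤ c) = true := by simp; omega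
      rw [hnc]
      simp

theorem pvHas_cons_ne (needle n x : Int) (rest : List Int) (hx : ¬ needle = x) (_hn : 1 ≤ n) :
    pvHas needle n (x :: rest) = pvHas needle n rest := by
  have hp : pvPref needle (x :: rest) = 0 := by simp [pvPref, hx]
  show (decide (n ≤ (pvPref needle (x :: rest) : Int)) || pvHas needle n rest) = pvHas needle n rest
  rw [hp]
  have hz : ¬ (n ≤ (((0 : Nat) : Int))) := by push_cast; omega
  rw [decide_eq_false hz, Bool.false_or]

theorem pvHas_decomp (needle n : Int) (_hn : 1 ≤ n) (xs : List Int) :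
    pvHas needle n xs
      = ((decide (1 ≤ pvPref needle xs) && decide (n ≤ (pvPref needle xs : Int)))
          || pvHas needle n (xs.drop (pvPref needle xs))) := by
  induction xs with
  | nil => simp [pvHas, pvPref]
  | cons x rest ih =>
    by_cases hx : needle = x
    · subst hx
      have hpc : pvPref needle (needle :: rest) = pvPref needle rest + 1 := by simp [pvPref]
      show (decide (n ≤ (pvPref needle (needle :: rest) : Int)) || pvHas needle n rest) = _
      rw [hpc, List.drop_succ_cons, ih]
      cases hH : pvHas needle n (rest.drop (pvPref needle rest))
      · simp only [Bool.or_false]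
        rw [Bool.eq_iff_iff]
        simp only [Bool.or_eq_true, Bool.and_eq_true, decide_eq_true_eq]
        push_cast
        simp only [true_and]
        omega
      · simp
    · have hp : pvPref needle (x :: rest) = 0 := by simp [pvPref, hx]
      rw [hp, List.drop_zero]
      simp

theorem pvG_eq (needle n : Int) (hn : 1 ≤ n) (xs : List Int) (c : Int) (hc : 0 ≤ c) :
    pvG needle n xs c
      = ((decide (1 ≤ pvPref needle xs) && decide (n ≤ c + (pvPref needle xs : Int)))
          || pvHas needle n (xs.drop (pvPref needle xs))) := by
  induction xs generalizing c with
  | nil => simp [pvG, pvPref, pvHas]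
  | cons x rest ih =>
    by_cases hx : needle = x
    · subst hx
      have hg : pvG needle n (needle :: rest) c
          = (decide (n ≤ c + 1) || pvG needle n rest (c + 1)) := by simp [pvG]
      have hpc : pvPref needle (needle :: rest) = pvPref needle rest + 1 := by simp [pvPref]
      rw [hg, hpc, List.drop_succ_cons, ih (c + 1) (by omega)]
      cases hH : pvHas needle n (rest.drop (pvPref needle rest))
      · simp only [Bool.or_false]
        rw [Bool.eq_iff_iff]
        simp only [Bool.or_eq_true, Bool.and_eq_true, decide_eq_true_eq]
        push_cast
        simp only [true_and]
        omega
      · simp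
    · have hg : pvG needle n (x :: rest) c
          = (decide (n ≤ (0 : Int)) || pvG needle n rest 0) := by simp [pvG, hx]
      have hp0 : pvPref needle (x :: rest) = 0 := by simp [pvPref, hx]
      rw [hg, hp0, List.drop_zero, ih 0 le_rfl]
      have hz : decide (n ≤ (0 : Int)) = false := by simp; omega
      have hd : (decide (1 ≤ pvPref needle rest)
            && decide (n ≤ (0 : Int) + (pvPref needle rest : Int))
          || pvHas needle n (rest.drop (pvPref needle rest)))
          = pvHas needle n rest := by
        rw [zero_add, ← pvHas_decomp needle n hn]
      rw [hd, hz, Bool.false_or, ← pvHas_cons_ne needle n x rest hx hn]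
      simp

-- A equals the suffix-run test, for positive n
theorem A_eq_pvHas (needle n : Int) (hn : 1 ≤ n) (xs : List Int) :
    find_strike xs needle n = pvHas needle n xs := by
  unfold find_strike
  rw [if_neg (by omega), pvLoopA_eq_pvG]
  have h0 : decide (n ≤ (0 : Int)) = false := by simp; omega
  rw [h0, Bool.false_or, pvG_eq needle n hn xs 0 le_rfl]
  rw [zero_add, ← pvHas_decomp needle n hn]

theorem pvHas_iff (needle n : Int) (xs : List Int) :
    pvHas needle n xs = true
      ↔ ∃ i, i < xs.length ∧ n ≤ (pvPref needle (xs.drop i) : Int) := by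
  induction xs with
  | nil => simp [pvHas]
  | cons x rest ih =>
    show (decide (n ≤ (pvPref needle (x :: rest) : Int)) || pvHas needle n rest) = true ↔ _
    rw [Bool.or_eq_true, decide_eq_true_eq, ih]
    constructor
    · rintro (h | ⟨i, hi, h⟩)
      · exact ⟨0, by simp, by simpa using h⟩
      · exact ⟨i + 1, by simp; omega, by simpa using h⟩
    · rintro ⟨i, hi, h⟩
      cases i with
      | zero => left; simpa using h
      | succ j => right; exact ⟨j, by simp at hi; omega, by simpa using h⟩

-- a length-m prefix of the flag bitmap all set is exactly a leading needle-run of length ≥ m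
theorem flags_take_iff (needle : Int) (m : Nat) (ys : List Int) (hm : m ≤ ys.length) :
    (ys.map (fun x => x == needle)).take m = List.replicate m true ↔ m ≤ pvPref needle ys := by
  induction m generalizing ys with
  | zero => simp
  | succ k ih =>
    cases ys with
    | nil => simp at hm
    | cons y rest =>
      rw [List.map_cons, List.take_succ_cons, List.replicate_succ, List.cons_eq_cons]
      by_cases hy : needle = y
      · subst hy
        have hp : pvPref needle (needle :: rest) = pvPref needle rest + 1 := by simp [pvPref]
        rw [hp]
        simp only [beq_self_eq_true, true_and]
        rw [ih rest (by simp at hm; omega)]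
        omega
      · have hp : pvPref needle (y :: rest) = 0 := by simp [pvPref, hy]
        rw [hp]
        constructor
        · rintro ⟨h, -⟩
          rw [beq_iff_eq] at h
          exact absurd h.symm hy
        · omega

-- the substring search finds a match iff some window of s equals p
theorem pvFindAux_ne_iff (p : List Bool) (s : List Bool) (i : Int) (hi : 0 ≤ i) :
    pvFindAux p s i ≠ -1 ↔ ∃ j, j + p.length ≤ s.length ∧ (s.drop j).take p.length = p := by
  induction s generalizing i with
  | nil =>
    rw [pvFindAux]
    by_cases hp : ([] : List Bool).length < p.length
    · rw [if_pos hp]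
      simp only [List.length_nil] at hp
      constructor
      · intro h; exact absurd rfl h
      · rintro ⟨j, hj, -⟩
        simp only [List.length_nil] at hj
        omega
    · rw [if_neg hp]
      simp only [List.length_nil, Nat.not_lt, Nat.le_zero] at hp
      have hp0 : p = [] := List.eq_nil_of_length_eq_zero hp
      subst hp0
      simp only [List.take_nil, beq_self_eq_true, if_true]
      constructor
      · intro _; exact ⟨0, by simp, by simp⟩
      · intro _; omega
  | cons x rest ih =>
    rw [pvFindAux]
    by_cases hlt : (x :: rest).length < p.length
    · rw [if_pos hlt]
      constructor
      · intro h; exact absurd rfl h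
      · rintro ⟨j, hj, -⟩; omega
    · rw [if_neg hlt]
      by_cases heq : (x :: rest).take p.length == p
      · rw [if_pos heq]
        constructor
        · intro _
          exact ⟨0, by simp at hlt ⊢; omega, by simpa using (beq_iff_eq.mp heq)⟩
        · intro _; omega
      · rw [if_neg heq]
        rw [ih (i + 1) (by omega)]
        constructor
        · rintro ⟨j, hj, h⟩
          exact ⟨j + 1, by simp at hj ⊢; omega, by simpa using h⟩
        · rintro ⟨j, hj, h⟩
          cases j with
          | zero =>
            exfalso
            rw [List.drop_zero] at h
            exact heq (beq_iff_eq.mpr h)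
          | succ k =>
            exact ⟨k, by simp at hj; omega, by simpa using h⟩

-- ===== VERDICT (by name: the statement is the Claim_ definition above) =====
theorem find_strike_spec : Claim_equal_find_strike := by
  intro xs needle n _
  unfold Spec_find_strike
  by_cases hn : n ≤ 0
  · unfold find_strike find_strike_alt
    rw [if_pos hn, if_pos (Or.inl hn)]
  · have hn1 : 1 ≤ n := by omega
    rw [A_eq_pvHas needle n hn1 xs]
    by_cases hlen : (xs.length : Int) < n
    · unfold find_strike_alt
      rw [if_pos (Or.inr hlen)]
      cases hcase : pvHas needle n xs
      · rfl
      · exfalso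
        obtain ⟨i, hi, h⟩ := (pvHas_iff needle n xs).mp hcase
        have := pvPref_le_length needle (xs.drop i)
        rw [List.length_drop] at this
        omega
    · -- 1 ≤ n ≤ len: A's run test vs B's substring search
      unfold find_strike_alt
      rw [if_neg (by omega)]
      rw [Bool.eq_iff_iff, pvHas_iff]
      simp only [decide_eq_true_eq]
      rw [pvFindAux_ne_iff _ _ 0 le_rfl]
      simp only [List.length_replicate, List.length_map]
      constructor
      · rintro ⟨i, hi, h⟩
        have hpl := pvPref_le_length needle (xs.drop i)
        rw [List.length_drop] at hpl
        have hprf : n.toNat ≤ pvPref needle (xs.drop i) := by omega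
        refine ⟨i, by omega, ?_⟩
        rw [← List.map_drop]
        have hlen2 : n.toNat ≤ (xs.drop i).length := by rw [List.length_drop]; omega
        exact (flags_take_iff needle n.toNat (xs.drop i) hlen2).mpr hprf
      · rintro ⟨j, hj, h⟩
        rw [← List.map_drop] at h
        have hlen2 : n.toNat ≤ (xs.drop j).length := by rw [List.length_drop]; omega
        rw [flags_take_iff needle n.toNat (xs.drop j) hlen2] at h
        exact ⟨j, by omega, by omega⟩
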